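-- pv_equiv track=rewrite | github.com/Bodorol/Cryptopals-Python | single_byte_xor.py | single_byte_xor
-- ===== SOURCE A (Python) =====
-- def single_byte_xor(hex_string):
--     hex_array = bytearray.fromhex(hex_string)
--     string_array = []
--     for i in range(256):
--         new_array = bytearray([i ^ byte for byte in hex_array])
--         try:
--             string = new_array.decode('ascii')
--         except:
--             string = ""
--         if string:
--             string_array.append(string)
--     return string_array
-- ===== SOURCE B (Python) =====
-- def single_byte_xor(hex_string):
--     data = bytearray.fromhex(hex_string)
--     highs = {b & 0x80 for b in data}
--     if len(highs) != 1:
--         return []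
--     h = highs.pop()
--     return [data.translate(bytes(k ^ j for j in range(256))).decode('ascii')
--             for k in range(h, h + 128)]
-- ===== Notes on version B (the rewrite author's own statement) =====
-- stated objective: faster
-- what changed: Instead of A's brute force over all 256 keys with a try/except ASCII decode per key, B scans the bytes once for their distinct high bits and, when exactly one high bit h remains, emits only the 128 valid decodings for keys h..h+127 (via a bytes.translate table per key); otherwise it returns [].
import Mathlib
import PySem

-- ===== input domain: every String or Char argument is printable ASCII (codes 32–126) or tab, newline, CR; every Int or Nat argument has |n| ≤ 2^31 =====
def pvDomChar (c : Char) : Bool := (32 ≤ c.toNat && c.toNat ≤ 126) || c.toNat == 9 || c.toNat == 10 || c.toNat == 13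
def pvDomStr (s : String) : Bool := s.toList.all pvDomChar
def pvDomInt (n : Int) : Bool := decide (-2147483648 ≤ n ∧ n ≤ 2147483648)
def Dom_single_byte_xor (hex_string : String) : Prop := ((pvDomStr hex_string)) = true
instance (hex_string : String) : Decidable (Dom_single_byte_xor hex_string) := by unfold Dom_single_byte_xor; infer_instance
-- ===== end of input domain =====

-- B replaces A's 256-key try/except brute force by a one-pass high-bit analysis that
-- emits only the 128 valid decodings directly (objective: faster, constant factor).

-- ===== PORT A =====
-- shared helper: bytearray.fromhex — exact on Dom (ASCII whitespace there is 9/10/13/32;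
-- Python skips whitespace between byte pairs, requires two hex digits per byte)
def pvIsWS (n : Nat) : Bool := n == 32 || n == 9 || n == 10 || n == 13
def pvIsHex (n : Nat) : Bool := (48 ≤ n && n ≤ 57) || (65 ≤ n && n ≤ 70) || (97 ≤ n && n ≤ 102)
def pvHexVal (n : Nat) : Nat := if n ≤ 57 then n - 48 else if n ≤ 70 then n - 55 else n - 87

def pvFromHex? : List Char → Option (List Nat)
  | [] => some []
  | [c] => if pvIsWS c.toNat then some [] else none
  | c :: d :: rest =>
    if pvIsWS c.toNat then pvFromHex? (d :: rest)
    else if pvIsHex c.toNat && pvIsHex d.toNat then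
      (pvFromHex? rest).map (fun bs => (pvHexVal c.toNat * 16 + pvHexVal d.toNat) :: bs)
    else none

-- port of A; `none` = ValueError from fromhex, excluded by Pre_.
-- decode('ascii') succeeds iff every byte < 128; `except: string = ""`.
def single_byte_xor (hex_string : String) : List String :=
  match pvFromHex? hex_string.toList with
  | none => []
  | some hex_array =>
    (List.range 256).foldl (fun string_array i =>
      let new_array := hex_array.map (fun byte => i ^^^ byte)
      let string := if new_array.all (fun b => b < 128) then String.ofList (new_array.map Char.ofNat) else ""
      if string ≠ "" then string_array ++ [string] else string_array) []

-- ===== PORT B =====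
-- `{b & 0x80 for b in data}` is a Python set: PySem.Set (first-occurrence order; only its
-- length is inspected).  `range(h, h+128)` = List.range' h 128; `data.translate(table)`
-- maps each byte b to table[b], and `.decode('ascii')` turns the bytes into their chars.
def single_byte_xor_alt (hex_string : String) : List String :=
  match pvFromHex? hex_string.toList with
  | none => []
  | some data =>
    match PySem.Set.ofList (data.map (fun b => b &&& 128)) with
    | [h] => (List.range' h 128).map (fun k =>
        let table := (List.range 256).map (fun j => k ^^^ j)
        String.ofList ((data.map (fun b => table.getD b 0)).map Char.ofNat))
    | _ => []

-- ===== PRECONDITION & SPEC =====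
-- Pre_ excludes exactly the strings on which bytearray.fromhex raises ValueError
-- (and with it A): after skipping whitespace, the string must be pairs of hex digits.
def pvHexShape : List Char → Bool
  | [] => true
  | [c] => pvIsWS c.toNat
  | c :: d :: rest =>
    if pvIsWS c.toNat then pvHexShape (d :: rest)
    else pvIsHex c.toNat && pvIsHex d.toNat && pvHexShape rest

def Pre_single_byte_xor (hex_string : String) : Prop := pvHexShape hex_string.toList = true
instance (hex_string : String) : Decidable (Pre_single_byte_xor hex_string) := by unfold Pre_single_byte_xor; infer_instance
def pvWitness_single_byte_xor : String := "1b 2c"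

def Spec_single_byte_xor (hex_string : String) (out : List String) : Prop := out = single_byte_xor_alt hex_string
instance (hex_string : String) (out : List String) : Decidable (Spec_single_byte_xor hex_string out) := by unfold Spec_single_byte_xor; infer_instance

-- ===== CLAIM (what is proved, stated in full; the proofs are below) =====
def Claim_equal_single_byte_xor : Prop := ∀ (hex_string : String), Dom_single_byte_xor hex_string → Pre_single_byte_xor hex_string → Spec_single_byte_xor hex_string (single_byte_xor hex_string)

-- ===== LEMMAS AND PROOFS =====

lemma pvShape_isSome : ∀ cs : List Char, pvHexShape cs = true → (pvFromHex? cs).isSome := by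
  intro cs
  fun_induction pvFromHex? cs with
  | case1 => intro _; rfl
  | case2 c hws => intro _; simp
  | case3 c hws => intro h; rw [pvHexShape] at h; exact absurd h hws
  | case4 c d rest hws ih =>
    intro h
    rw [pvHexShape, if_pos hws] at h
    simpa [pvFromHex?, hws] using ih h
  | case5 c d rest hws hhex ih =>
    intro h
    rw [pvHexShape, if_neg hws] at h
    simp only [Bool.and_eq_true] at h
    simpa [pvFromHex?, hws, hhex] using ih h.2
  | case6 c d rest hws hhex =>
    intro h
    rw [pvHexShape, if_neg hws] at h
    simp only [Bool.and_eq_true] at h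
    simp [h.1.1, h.1.2] at hhex

lemma pvFromHex_bound : ∀ cs bs, pvFromHex? cs = some bs → ∀ b ∈ bs, b < 256 := by
  intro cs
  fun_induction pvFromHex? cs with
  | case1 => intro bs h; injection h with h; simp [← h]
  | case2 c hws => intro bs h; injection h with h; simp [← h]
  | case3 c hws => intro bs h; simp at h
  | case4 c d rest hws ih => intro bs h; exact ih bs h
  | case5 c d rest hws hhex ih =>
    intro bs h
    simp only [Option.map_eq_some_iff] at h
    obtain ⟨bs', hbs', rfl⟩ := h
    intro b hb
    rcases List.mem_cons.1 hb with rfl | hb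
    · simp [pvIsHex] at hhex
      obtain ⟨hc, hd⟩ := hhex
      unfold pvHexVal
      split_ifs <;> omega
    · exact ih bs' hbs' b hb
  | case6 c d rest hws hhex =>
    intro bs h
    simp at h

lemma lt128_iff_testBit (n : Nat) (h : n < 256) : n < 128 ↔ n.testBit 7 = false := by
  rw [Nat.testBit_eq_decide_div_mod_eq]
  simp only [decide_eq_false_iff_not]
  omega

lemma testBit7_eq (n : Nat) (h : n < 256) : n.testBit 7 = decide (128 ≤ n) := by
  have ht := lt128_iff_testBit n h
  cases hx : n.testBit 7 <;> simp_all

lemma and128_eq (b : Nat) (hb : b < 256) : b &&& 128 = if 128 ≤ b then 128 else 0 := by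
  have h7 : (128 : Nat) = 2 ^ 7 := by norm_num
  rw [h7, Nat.and_two_pow, testBit7_eq b hb]
  by_cases h1 : 128 ≤ b <;> simp [h1]

lemma xor_lt_128_iff (i b : Nat) (hi : i < 256) (hb : b < 256) :
    (i ^^^ b < 128) ↔ (i &&& 128 = b &&& 128) := by
  have hx : i ^^^ b < 256 := by
    have h8 : (256 : Nat) = 2 ^ 8 := by norm_num
    rw [h8] at hi hb ⊢
    exact Nat.xor_lt_two_pow hi hb
  rw [lt128_iff_testBit _ hx, Nat.testBit_xor, and128_eq i hi, and128_eq b hb,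
      testBit7_eq i hi, testBit7_eq b hb]
  by_cases h1 : 128 ≤ i <;> by_cases h2 : 128 ≤ b <;> simp [h1, h2]

lemma single_of_nodup_mem {l : List Nat} {h : Nat} (hn : l.Nodup) (hm : h ∈ l)
    (ha : ∀ x ∈ l, x = h) : l = [h] := by
  match l with
  | [] => simp at hm
  | [a] => simp [ha a (by simp)]
  | a :: b :: t =>
    have h1 := ha a (by simp)
    have h2 := ha b (by simp)
    subst h1
    rw [h2] at hn
    simp at hn

def pvKeyStr (bs : List Nat) (i : Nat) : String :=
  if (bs.map (fun byte => i ^^^ byte)).all (fun b => b < 128) then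
    String.ofList ((bs.map (fun byte => i ^^^ byte)).map Char.ofNat)
  else ""

lemma pvKeyStr_ne (bs : List Nat) (i : Nat) (hb : ∀ b ∈ bs, b < 256) (hi : i < 256) :
    (pvKeyStr bs i ≠ "") ↔ (bs ≠ [] ∧ ∀ b ∈ bs, i &&& 128 = b &&& 128) := by
  unfold pvKeyStr
  by_cases hall : (bs.map (fun byte => i ^^^ byte)).all (fun b => b < 128)
  · rw [if_pos hall]
    simp only [List.all_eq_true, List.mem_map, forall_exists_index, and_imp] at hall
    constructor
    · intro hne
      constructor
      · rintro rfl; exact hne (by simp)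
      · intro b hbm
        exact (xor_lt_128_iff i b hi (hb b hbm)).mp (of_decide_eq_true (hall _ b hbm rfl))
    · intro ⟨hne, _⟩
      cases bs with
      | nil => exact absurd rfl hne
      | cons a t => simp [String.ofList_eq_empty_iff]
  · rw [if_neg hall]
    simp only [List.all_eq_true, List.mem_map, not_forall] at hall
    obtain ⟨x, ⟨b, hbm, rfl⟩, hx⟩ := hall
    simp only [ne_eq, not_true_eq_false, false_iff, not_and, not_forall]
    intro _
    exact ⟨b, hbm, fun he => hx (by simpa using (xor_lt_128_iff i b hi (hb b hbm)).mpr he)⟩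

set_option maxRecDepth 100000 in
lemma core_eq (bs : List Nat) (hb : ∀ b ∈ bs, b < 256) :
    (List.range 256).foldl (fun string_array i =>
      let new_array := bs.map (fun byte => i ^^^ byte)
      let string := if new_array.all (fun b => b < 128) then String.ofList (new_array.map Char.ofNat) else ""
      if string ≠ "" then string_array ++ [string] else string_array) []
    =
    (match PySem.Set.ofList (bs.map (fun b => b &&& 128)) with
     | [h] => (List.range' h 128).map (fun k =>
        let table := (List.range 256).map (fun j => k ^^^ j)
        String.ofList ((bs.map (fun b => table.getD b 0)).map Char.ofNat))
     | _ => []) := by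
  have hfold : (List.range 256).foldl (fun string_array i =>
      let new_array := bs.map (fun byte => i ^^^ byte)
      let string := if new_array.all (fun b => b < 128) then String.ofList (new_array.map Char.ofNat) else ""
      if string ≠ "" then string_array ++ [string] else string_array) []
      = [] ++ ((List.range 256).filter (fun i => decide (pvKeyStr bs i ≠ ""))).map (pvKeyStr bs) :=
    PySem.List.foldl_append_ite (fun i => pvKeyStr bs i ≠ "") (pvKeyStr bs) (List.range 256) []
  rw [hfold, List.nil_append]
  cases bs with
  | nil =>
    have : ∀ i ∈ List.range 256, ¬ (pvKeyStr [] i ≠ "") := by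
      intro i _ hcon
      exact hcon (by simp [pvKeyStr])
    rw [List.filter_eq_nil_iff.mpr (by intro i hi; simpa using this i hi)]
    rfl
  | cons b0 rest =>
    have hb0 : b0 < 256 := hb b0 (by simp)
    by_cases hall : ∀ b ∈ (b0 :: rest), b &&& 128 = b0 &&& 128
    · -- single high bit
      have hofl : PySem.Set.ofList ((b0 :: rest).map (fun b => b &&& 128)) = [b0 &&& 128] := by
        apply single_of_nodup_mem (PySem.Set.nodup_ofList _)
        · exact (PySem.Set.mem_ofList _ _).mpr (by simp)
        · intro x hx
          obtain ⟨b, hbm, rfl⟩ := List.mem_map.mp ((PySem.Set.mem_ofList _ _).mp hx)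
          exact hall b hbm
      rw [hofl]
      have hcong : ((List.range 256).filter (fun i => decide (pvKeyStr (b0 :: rest) i ≠ "")))
          = (List.range 256).filter (fun i => decide (i &&& 128 = b0 &&& 128)) := by
        apply List.filter_congr
        intro i hi
        simp only [decide_eq_decide]
        rw [pvKeyStr_ne _ _ hb (List.mem_range.mp hi)]
        constructor
        · intro ⟨_, hall'⟩; exact hall' b0 (by simp)
        · intro hh
          refine ⟨by simp, fun b hbm => ?_⟩
          rw [hh, hall b hbm]
      rw [hcong]
      have h01 : b0 &&& 128 = 0 ∨ b0 &&& 128 = 128 := by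
        rw [and128_eq b0 hb0]; by_cases h1 : 128 ≤ b0 <;> simp [h1]
      have hfl : (List.range 256).filter (fun i => decide (i &&& 128 = b0 &&& 128))
          = List.range' (b0 &&& 128) 128 := by
        rcases h01 with h01 | h01 <;> rw [h01] <;> decide
      rw [hfl]
      apply List.map_congr_left
      intro k hk
      have hk' := List.mem_range'_1.mp hk
      have hk256 : k < 256 := by omega
      have hkand : k &&& 128 = b0 &&& 128 := by
        rw [and128_eq k hk256]
        rcases h01 with h01 | h01 <;> rw [h01] at hk' ⊢ <;> simp <;> omega
      have halltrue : ((b0 :: rest).map (fun byte => k ^^^ byte)).all (fun b => b < 128) := by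
        simp only [List.all_eq_true, List.mem_map, forall_exists_index, and_imp,
          decide_eq_true_eq]
        rintro _ b hbm rfl
        exact (xor_lt_128_iff k b hk256 (hb b hbm)).mpr (by rw [hkand, hall b hbm])
      rw [pvKeyStr, if_pos halltrue]
      show String.ofList _ = String.ofList _
      refine congrArg String.ofList ?_
      rw [List.map_map, List.map_map]
      apply List.map_congr_left
      intro b hbm
      have hb' : b < 256 := hb b hbm
      simp [Function.comp, List.getD_eq_getElem?_getD, hb']
    · -- mixed high bits
      push Not at hall
      obtain ⟨b1, hb1m, hb1ne⟩ := hall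
      have hfl : ((List.range 256).filter (fun i => decide (pvKeyStr (b0 :: rest) i ≠ ""))) = [] := by
        apply List.filter_eq_nil_iff.mpr
        intro i hi
        simp only [decide_eq_true_eq]
        rw [pvKeyStr_ne _ _ hb (List.mem_range.mp hi)]
        rintro ⟨_, hall'⟩
        exact hb1ne ((hall' b1 hb1m).symm.trans (hall' b0 (by simp)))
      rw [hfl]
      have : ∀ x, PySem.Set.ofList ((b0 :: rest).map (fun b => b &&& 128)) ≠ [x] := by
        intro x hx
        have h0 : b0 &&& 128 ∈ [x] := hx ▸ (PySem.Set.mem_ofList _ _).mpr (by simp)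
        have h1 : b1 &&& 128 ∈ [x] := hx ▸ (PySem.Set.mem_ofList _ _).mpr (List.mem_map_of_mem hb1m)
        simp at h0 h1
        exact hb1ne (h1.symm ▸ h0.symm ▸ rfl)
      rcases hS : PySem.Set.ofList ((b0 :: rest).map (fun b => b &&& 128)) with _ | ⟨x, _ | ⟨y, t⟩⟩
      · rfl
      · exact absurd hS (this x)
      · rfl

-- ===== VERDICT (by name: the statement is the Claim_ definition above) =====
theorem single_byte_xor_spec : Claim_equal_single_byte_xor := by
  intro hex _dom pre
  unfold Spec_single_byte_xor single_byte_xor single_byte_xor_alt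
  have hs := pvShape_isSome hex.toList pre
  cases hF : pvFromHex? hex.toList with
  | none => simp [hF] at hs
  | some bs => exact core_eq bs (pvFromHex_bound _ _ hF)
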